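-- pv_equiv track=rewrite | github.com/satamanchuk-star/tg-bot | app/utils/text.py | contains_profanity
-- ===== SOURCE A (Python) =====
-- def contains_profanity(
--     words: list[str],
--     exact_words: set[str],
--     prefixes: set[str],
--     exceptions: set[str],
-- ) -> bool:
--     """Проверяет наличие матных слов с учетом исключений и префиксов."""
--
--     for word in words:
--         if word in exceptions:
--             continue
--         if word in exact_words:
--             return True
--         if any(word.startswith(prefix) for prefix in prefixes):
--             return True
--     return False
-- ===== SOURCE B (Python) =====
-- def contains_profanity(words, exact_words, prefixes, exceptions):
--     """Length-indexed prefix lookup: precompute the distinct banned-prefix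
--     lengths once, then classify each word by hashed lookups of its prefixes
--     of exactly those lengths; the word loop becomes a filtered any()."""
--     banned = set(exact_words)
--     pref = set(prefixes)
--     lens = sorted({len(p) for p in prefixes})
--
--     def is_bad(w):
--         return w in banned or any(w[:k] in pref for k in lens if k <= len(w))
--
--     return any(is_bad(w) for w in words if w not in exceptions)
-- ===== Notes on version B (the rewrite author's own statement) =====
-- stated objective: alternative
-- what changed: B precomputes the sorted set of distinct banned-prefix lengths and hash sets of the exact words and prefixes, then decides each word by membership lookups of its prefixes of exactly those lengths, replacing A's per-word startswith scan over the whole prefix list; the word loop is a filtered any() instead of an explicit loop with continue/return.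
import Mathlib
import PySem

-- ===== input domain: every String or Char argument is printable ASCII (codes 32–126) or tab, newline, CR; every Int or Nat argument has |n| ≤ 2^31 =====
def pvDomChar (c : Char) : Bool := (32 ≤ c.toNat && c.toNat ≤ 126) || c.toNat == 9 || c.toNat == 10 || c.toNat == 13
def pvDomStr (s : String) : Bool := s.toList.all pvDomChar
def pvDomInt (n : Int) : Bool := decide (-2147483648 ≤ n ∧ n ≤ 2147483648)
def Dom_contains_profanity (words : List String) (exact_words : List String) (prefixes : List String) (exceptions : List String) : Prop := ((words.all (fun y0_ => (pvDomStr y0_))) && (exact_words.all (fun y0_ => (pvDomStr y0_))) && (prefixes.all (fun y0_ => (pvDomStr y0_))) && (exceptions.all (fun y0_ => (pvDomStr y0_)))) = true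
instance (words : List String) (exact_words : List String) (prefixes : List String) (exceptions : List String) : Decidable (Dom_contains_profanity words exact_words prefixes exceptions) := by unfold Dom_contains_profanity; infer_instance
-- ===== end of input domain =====

-- ===== PORT A =====
-- B classifies words by hashed lookups of their prefixes of the precomputed banned-prefix
-- lengths instead of A's per-word startswith scan (objective: alternative algorithm).
-- A: explicit loop over words with continue/early return.
def pvA_loop (exact_words : List String) (prefixes : List String) (exceptions : List String) : List String → Bool
  | [] => false
  | w :: ws =>
    if PySem.Set.contains exceptions w then pvA_loop exact_words prefixes exceptions ws
    else if PySem.Set.contains exact_words w then true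
    else if prefixes.any (fun p => PySem.Str.startswith w p) then true
    else pvA_loop exact_words prefixes exceptions ws

def contains_profanity (words : List String) (exact_words : List String) (prefixes : List String) (exceptions : List String) : Bool :=
  pvA_loop exact_words prefixes exceptions words

-- ===== PORT B =====
-- Source B's is_bad(w): w in banned or any(w[:k] in pref for k in lens if k <= len(w))
def pvB_isBad (banned : PySem.Set String) (pref : PySem.Set String) (lens : List Int) (w : String) : Bool :=
  PySem.Set.contains banned w ||
    ((lens.filter (fun k => decide (k ≤ PySem.Str.len w))).any
      (fun k => PySem.Set.contains pref (PySem.Str.slice w none (some k))))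

def contains_profanity_alt (words : List String) (exact_words : List String) (prefixes : List String) (exceptions : List String) : Bool :=
  let banned := PySem.Set.ofList exact_words
  let pref := PySem.Set.ofList prefixes
  let lens := PySem.List.sorted (PySem.Set.ofList (prefixes.map PySem.Str.len)) (fun x => x) false
  (words.filter (fun w => !PySem.Set.contains exceptions w)).any (pvB_isBad banned pref lens)

-- ===== PRECONDITION & SPEC =====
def Spec_contains_profanity (words : List String) (exact_words : List String) (prefixes : List String) (exceptions : List String) (out : Bool) : Prop := out = contains_profanity_alt words exact_words prefixes exceptions
instance (words : List String) (exact_words : List String) (prefixes : List String) (exceptions : List String) (out : Bool) : Decidable (Spec_contains_profanity words exact_words prefixes exceptions out) := by unfold Spec_contains_profanity; infer_instance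

-- ===== CLAIM (what is proved, stated in full; the proofs are below) =====
def Claim_equal_contains_profanity : Prop := ∀ (words : List String) (exact_words : List String) (prefixes : List String) (exceptions : List String), Dom_contains_profanity words exact_words prefixes exceptions → Spec_contains_profanity words exact_words prefixes exceptions (contains_profanity words exact_words prefixes exceptions)

-- ===== LEMMAS AND PROOFS =====
-- Per word: a prefix of w of one of the banned-prefix lengths is in the prefix set
-- iff w starts with some listed prefix.
lemma pvB_lens_eq (prefixes : List String) (w : String) :
    ((PySem.List.sorted (PySem.Set.ofList (prefixes.map PySem.Str.len)) (fun x => x) false).filter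
        (fun k => decide (k ≤ PySem.Str.len w))).any
      (fun k => PySem.Set.contains (PySem.Set.ofList prefixes) (PySem.Str.slice w none (some k)))
      = prefixes.any (fun p => PySem.Str.startswith w p) := by
  rw [Bool.eq_iff_iff]
  simp only [List.any_eq_true, List.mem_filter, PySem.List.mem_sorted, PySem.Set.mem_ofList,
    List.mem_map, PySem.Set.contains_iff, decide_eq_true_eq]
  constructor
  · rintro ⟨k, ⟨⟨p', _, rfl⟩, _⟩, hmem⟩
    have h0 : (0 : Int) ≤ PySem.Str.len p' := by rw [PySem.Str.len_eq]; positivity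
    refine ⟨_, hmem, ?_⟩
    rw [PySem.Str.startswith_eq, PySem.Chars.startswith_iff, PySem.Str.toList_slice,
      PySem.Chars.slice_eq_listSlice, PySem.List.slice_to _ h0]
    exact List.take_prefix _ _
  · rintro ⟨p, hp, hsw⟩
    rw [PySem.Str.startswith_eq, PySem.Chars.startswith_iff] at hsw
    refine ⟨PySem.Str.len p, ⟨⟨p, hp, rfl⟩, ?_⟩, ?_⟩
    · rw [PySem.Str.len_eq, PySem.Str.len_eq]
      exact_mod_cast hsw.length_le
    · have : PySem.Str.slice w none (some (PySem.Str.len p)) = p := by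
        apply String.toList_inj.mp
        rw [PySem.Str.toList_slice, PySem.Chars.slice_eq_listSlice, PySem.Str.len_eq,
          PySem.List.slice_to _ (by positivity), Int.toNat_natCast]
        exact (List.prefix_iff_eq_take.mp hsw).symm
      rw [this]
      exact hp

lemma pvB_isBad_eq (exact_words prefixes : List String) (w : String) :
    pvB_isBad (PySem.Set.ofList exact_words) (PySem.Set.ofList prefixes)
        (PySem.List.sorted (PySem.Set.ofList (prefixes.map PySem.Str.len)) (fun x => x) false) w
      = (PySem.Set.contains exact_words w || prefixes.any (fun p => PySem.Str.startswith w p)) := by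
  rw [pvB_isBad, pvB_lens_eq]
  have : PySem.Set.contains (PySem.Set.ofList exact_words) w
      = PySem.Set.contains exact_words w := by
    rw [Bool.eq_iff_iff, PySem.Set.contains_iff, PySem.Set.contains_iff, PySem.Set.mem_ofList]
  rw [this]

lemma pv_if_or (a b r : Bool) :
    (if a then true else if b then true else r) = ((a || b) || r) := by
  cases a <;> cases b <;> simp

lemma pv_loops_eq (exact_words prefixes exceptions : List String) (ws : List String) :
    pvA_loop exact_words prefixes exceptions ws
      = (ws.filter (fun w => !PySem.Set.contains exceptions w)).any
          (pvB_isBad (PySem.Set.ofList exact_words) (PySem.Set.ofList prefixes)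
            (PySem.List.sorted (PySem.Set.ofList (prefixes.map PySem.Str.len)) (fun x => x) false)) := by
  induction ws with
  | nil => rfl
  | cons w ws ih =>
    rw [pvA_loop, List.filter_cons]
    cases hx : PySem.Set.contains exceptions w with
    | true =>
      simp only [Bool.not_true, if_neg Bool.false_ne_true]
      exact ih
    | false =>
      simp only [Bool.not_false, if_neg Bool.false_ne_true, if_true, List.any_cons,
        pvB_isBad_eq, ih, pv_if_or]

-- ===== VERDICT (by name: the statement is the Claim_ definition above) =====
theorem contains_profanity_spec : Claim_equal_contains_profanity := by
  intro words exact_words prefixes exceptions _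
  unfold Spec_contains_profanity contains_profanity contains_profanity_alt
  exact pv_loops_eq exact_words prefixes exceptions words
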